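-- pv_equiv track=rewrite | github.com/tbhrobrecht/NLP-BabyLM-3 | Abbreviations/evaluate_blimp_initials.py | find_diff_region
-- ===== SOURCE A (Python) =====
-- from typing import List, Dict, Tuple, Optional
--
-- def find_diff_region(good_text: str, bad_text: str) -> Tuple[int, int]:
--     """
--     Find first and last differing token positions between two sentences.
--
--     Args:
--         good_text: Good sentence (space-separated tokens)
--         bad_text: Bad sentence (space-separated tokens)
--
--     Returns:
--         (first_diff, last_diff) - indices of first and last differing tokens
--         Returns (0, max_len) if no differences or to handle length mismatches
--     """
--     good_tokens = good_text.split()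
--     bad_tokens = bad_text.split()
--
--     max_len = max(len(good_tokens), len(bad_tokens))
--     min_len = min(len(good_tokens), len(bad_tokens))
--
--     # Find first diff
--     first_diff = 0
--     for i in range(min_len):
--         if good_tokens[i] != bad_tokens[i]:
--             first_diff = i
--             break
--     else:
--         # No differences in common prefix, diff is in length mismatch
--         first_diff = min_len
--
--     # Find last diff (search backwards)
--     last_diff = max_len - 1
--     if len(good_tokens) == len(bad_tokens):
--         for i in range(min_len - 1, -1, -1):
--             if good_tokens[i] != bad_tokens[i]:
--                 last_diff = i
--                 break
--
--     return first_diff, last_diff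
-- ===== SOURCE B (Python) =====
-- def find_diff_region(good_text, bad_text):
--     good = good_text.split()
--     bad = bad_text.split()
--     n_g, n_b = len(good), len(bad)
--     min_len = min(n_g, n_b)
--     max_len = max(n_g, n_b)
--     diffs = [i for i in range(min_len) if good[i] != bad[i]]
--     first = diffs[0] if diffs else min_len
--     last = diffs[-1] if (n_g == n_b and diffs) else max_len - 1
--     return first, last
-- ===== Notes on version B (the rewrite author's own statement) =====
-- stated objective: alternative
-- what changed: A's two separate break-loops (one forward, one backward over the common prefix) are replaced by a single forward pass that collects all differing indices into one list, from which first/last are read off.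
import Mathlib
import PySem

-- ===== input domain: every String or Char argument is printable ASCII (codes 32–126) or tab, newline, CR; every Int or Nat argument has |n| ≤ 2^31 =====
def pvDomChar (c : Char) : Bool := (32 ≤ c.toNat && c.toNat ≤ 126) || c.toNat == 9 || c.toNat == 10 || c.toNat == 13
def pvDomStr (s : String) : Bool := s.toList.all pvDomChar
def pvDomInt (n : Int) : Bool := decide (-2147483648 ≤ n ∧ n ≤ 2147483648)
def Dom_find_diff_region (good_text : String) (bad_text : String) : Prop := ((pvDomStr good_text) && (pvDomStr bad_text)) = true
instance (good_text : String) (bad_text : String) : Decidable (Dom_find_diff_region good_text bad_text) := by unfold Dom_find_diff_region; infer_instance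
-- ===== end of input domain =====

-- B replaces A's two break-loops (forward + backward) with a single pass collecting the
-- differing indices, then takes its first/last element; objective: simpler decomposition.


-- ===== PORT A =====
-- A's break-loop: scan the index list, return the first index where p holds, else the default
def pvLoopFirst (p : Int → Bool) : List Int → Int → Int
  | [], d => d
  | i :: rest, d => if p i then i else pvLoopFirst p rest d

def find_diff_region (good_text : String) (bad_text : String) : Int × Int :=
  let good_tokens := PySem.Str.split₀ good_text
  let bad_tokens := PySem.Str.split₀ bad_text
  let max_len : Int := max (good_tokens.length : Int) (bad_tokens.length : Int)
  let min_len : Int := min (good_tokens.length : Int) (bad_tokens.length : Int)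
  let p := fun i : Int => PySem.List.pyGetD good_tokens i "" != PySem.List.pyGetD bad_tokens i ""
  -- for i in range(min_len): … break / else: first_diff = min_len
  let first_diff := pvLoopFirst p (PySem.List.pyRange 0 min_len 1) min_len
  -- last_diff = max_len - 1; if lengths equal, backward loop with break
  let last_diff :=
    if good_tokens.length = bad_tokens.length then
      pvLoopFirst p (PySem.List.pyRange (min_len - 1) (-1) (-1)) (max_len - 1)
    else max_len - 1
  (first_diff, last_diff)

-- ===== PORT B =====
def find_diff_region_alt (good_text : String) (bad_text : String) : Int × Int :=
  let good := PySem.Str.split₀ good_text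
  let bad := PySem.Str.split₀ bad_text
  let n_g : Int := good.length
  let n_b : Int := bad.length
  let min_len : Int := min n_g n_b
  let max_len : Int := max n_g n_b
  let diffs := (PySem.List.pyRange 0 min_len 1).filter
    (fun i => PySem.List.pyGetD good i "" != PySem.List.pyGetD bad i "")
  -- first = diffs[0] if diffs else min_len
  let first := match diffs with
    | [] => min_len
    | i :: _ => i
  -- last = diffs[-1] if (n_g == n_b and diffs) else max_len - 1
  let last := if n_g = n_b ∧ diffs ≠ [] then PySem.List.pyGetD diffs (-1) 0 else max_len - 1
  (first, last)

-- ===== PRECONDITION & SPEC =====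
def Spec_find_diff_region (good_text : String) (bad_text : String) (out : Int × Int) : Prop := out = find_diff_region_alt good_text bad_text
instance (good_text : String) (bad_text : String) (out : Int × Int) : Decidable (Spec_find_diff_region good_text bad_text out) := by unfold Spec_find_diff_region; infer_instance

-- ===== CLAIM (what is proved, stated in full; the proofs are below) =====
def Claim_equal_find_diff_region : Prop := ∀ (good_text : String) (bad_text : String), Dom_find_diff_region good_text bad_text → Spec_find_diff_region good_text bad_text (find_diff_region good_text bad_text)

-- ===== LEMMAS AND PROOFS =====

-- A's break-loop is head-of-filter with a default
theorem pvLoopFirst_eq_filter (p : Int → Bool) (is : List Int) (d : Int) :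
    pvLoopFirst p is d = match is.filter p with | [] => d | i :: _ => i := by
  induction is with
  | nil => rfl
  | cons i rest ih =>
    simp only [pvLoopFirst, List.filter_cons]
    by_cases h : p i = true <;> simp [h, ih]

theorem pvLoopFirst_reverse (p : Int → Bool) (l : List Int) (d : Int) :
    pvLoopFirst p l.reverse d = (l.filter p).getLastD d := by
  rw [pvLoopFirst_eq_filter, List.filter_reverse]
  rcases h : (l.filter p).reverse with _ | ⟨i, t⟩
  · simp [List.reverse_eq_nil_iff.mp h]
  · have h2 : l.filter p = (i :: t).reverse := by
      rw [← h, List.reverse_reverse]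
    simp [h2]

-- ===== VERDICT =====
theorem find_diff_region_spec : Claim_equal_find_diff_region := by
  unfold Claim_equal_find_diff_region Spec_find_diff_region
  intro gt bt _
  unfold find_diff_region find_diff_region_alt
  simp only []
  set good := PySem.Str.split₀ gt with hg
  set bad := PySem.Str.split₀ bt with hb
  set p := fun i : Int => PySem.List.pyGetD good i "" != PySem.List.pyGetD bad i "" with hp
  set mn : Int := min (good.length : Int) (bad.length : Int) with hmn
  set mx : Int := max (good.length : Int) (bad.length : Int) with hmx
  refine Prod.ext ?_ ?_
  · -- first components
    show pvLoopFirst p (PySem.List.pyRange 0 mn 1) mn = _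
    rw [pvLoopFirst_eq_filter]
  · -- second components
    show (if good.length = bad.length then
        pvLoopFirst p (PySem.List.pyRange (mn - 1) (-1) (-1)) (mx - 1)
      else mx - 1) = _
    by_cases hlen : good.length = bad.length
    · have hlen' : (good.length : Int) = (bad.length : Int) := by exact_mod_cast hlen
      rw [if_pos hlen]
      have hrev : PySem.List.pyRange (mn - 1) (-1) (-1)
          = (PySem.List.pyRange 0 mn 1).reverse := by
        have := PySem.List.pyRange_neg_one_eq_reverse (mn - 1) (-1)
        simpa using this
      rw [hrev, pvLoopFirst_reverse]
      by_cases hdn : (PySem.List.pyRange 0 mn 1).filter p = []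
      · simp [hdn]
      · rw [if_pos ⟨hlen', hdn⟩]
        dsimp only
        rw [PySem.List.pyGetD_neg_one _ 0 hdn,
          List.getLastD_eq_getLast?, List.getLast?_eq_getLast_of_ne_nil hdn]
        rfl
    · have hne : ¬ ((good.length : Int) = (bad.length : Int) ∧
          (PySem.List.pyRange 0 mn 1).filter p ≠ []) := by
        intro h; exact hlen (by exact_mod_cast h.1)
      rw [if_neg hlen, if_neg hne]
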